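-- pv_equiv track=rewrite | github.com/kcrans/aoc_2023 | day09/day9.py | left_sum
-- ===== SOURCE A (Python) =====
-- import copy
--
-- def left_sum(original_seqs):
--     seqs = copy.deepcopy(original_seqs)
--     great_sum = 0
--     for seq in seqs:
--         n = len(seq)
--         for i in range(n - 1):
--             # Start from the end of the list and go down to 1, 2, , ...
--             # Store the leftmost difference at index i + 1 (i = 0 is just the first list element)
--             for j in range(n-1, i, -1):
--                 seq[j] = seq[j] - seq[j - 1]
--         # Now we have a list of all the leftmost differences
--         # So we will iterate starting from the end of the list
--         # This time starting with zero we will have to subtract the difference below from the current value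
--         extrap = 0
--         for x in reversed(seq):
--             extrap = x - extrap
--         great_sum += extrap
--     return great_sum
-- ===== SOURCE B (Python) =====
-- def left_sum(original_seqs):
--     total = 0
--     for seq in original_seqs:
--         cur = list(seq)
--         extrap = 0
--         sign = 1
--         while cur:
--             extrap += sign * cur[0]
--             sign = -sign
--             cur = [b - a for a, b in zip(cur, cur[1:])]
--         total += extrap
--     return total
-- ===== Notes on version B (the rewrite author's own statement) =====
-- stated objective: simpler
-- what changed: Replaces A's in-place triangular index loop over an O(n^2) difference table plus a final reversed fold by a level-by-level loop that builds fresh first-difference lists and accumulates an alternating sum of their heads.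
import Mathlib
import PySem

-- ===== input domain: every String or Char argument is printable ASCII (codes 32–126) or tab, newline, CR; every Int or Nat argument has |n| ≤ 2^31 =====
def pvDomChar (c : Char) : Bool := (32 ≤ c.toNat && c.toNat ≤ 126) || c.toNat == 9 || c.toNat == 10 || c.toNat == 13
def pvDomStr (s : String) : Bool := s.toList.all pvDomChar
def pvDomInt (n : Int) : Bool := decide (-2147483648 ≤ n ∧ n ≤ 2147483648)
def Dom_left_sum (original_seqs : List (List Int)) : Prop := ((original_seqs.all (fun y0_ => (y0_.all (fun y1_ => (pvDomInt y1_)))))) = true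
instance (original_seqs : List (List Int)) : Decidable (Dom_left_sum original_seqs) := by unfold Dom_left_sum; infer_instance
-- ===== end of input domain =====

-- B replaces A's in-place triangular difference table and final reversed fold by
-- level-by-level fresh first-difference lists, accumulating an alternating sum of heads
-- (objective: simpler; same asymptotic cost).

-- ===== PORT A =====
-- seq[j] = seq[j] - seq[j - 1]
def innerStep (seq : List Int) (j : Int) : List Int :=
  PySem.List.pySetD seq j (PySem.List.pyGetD seq j 0 - PySem.List.pyGetD seq (j - 1) 0)

-- for j in range(n-1, i, -1): …
def innerFold (n i : Int) (seq : List Int) : List Int :=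
  (PySem.List.pyRange (n - 1) i (-1)).foldl innerStep seq

-- for i in range(n - 1): …
def outerFold (n : Int) (seq : List Int) : List Int :=
  (PySem.List.pyRange 0 (n - 1) 1).foldl (fun seq i => innerFold n i seq) seq

def left_sum (original_seqs : List (List Int)) : Int :=
  original_seqs.foldl (fun great_sum seq =>
    let n : Int := seq.length
    let seq := outerFold n seq
    let extrap := seq.reverse.foldl (fun extrap x => x - extrap) 0
    great_sum + extrap) 0

-- ===== PORT B =====
-- [b - a for a, b in zip(cur, cur[1:])]
def diffsB (cur : List Int) : List Int :=
  (cur.zip (PySem.List.slice cur (some 1) none)).map (fun ab => ab.2 - ab.1)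

theorem length_diffsB (cur : List Int) : (diffsB cur).length = cur.length - 1 := by
  simp [diffsB, PySem.List.slice_from_one]

-- while cur: extrap += sign * cur[0]; sign = -sign; cur = diffs
def whileB (cur : List Int) (extrap sign : Int) : Int :=
  match cur with
  | [] => extrap
  | x :: xs => whileB (diffsB (x :: xs)) (extrap + sign * x) (-sign)
termination_by cur.length
decreasing_by simp [length_diffsB]

def left_sum_alt (original_seqs : List (List Int)) : Int :=
  original_seqs.foldl (fun total seq => total + whileB seq 0 1) 0

-- ===== PRECONDITION & SPEC =====
def Spec_left_sum (original_seqs : List (List Int)) (out : Int) : Prop := out = left_sum_alt original_seqs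
instance (original_seqs : List (List Int)) (out : Int) : Decidable (Spec_left_sum original_seqs out) := by unfold Spec_left_sum; infer_instance

-- ===== CLAIM (what is proved, stated in full; the proofs are below) =====
def Claim_equal_left_sum : Prop := ∀ (original_seqs : List (List Int)), Dom_left_sum original_seqs → Spec_left_sum original_seqs (left_sum original_seqs)

-- ===== LEMMAS AND PROOFS =====

-- the list of leftmost differences [Δ⁰a₀, Δ¹a₀, Δ²a₀, …]
def Drec : List Int → List Int
  | [] => []
  | x :: xs => x :: Drec (diffsB (x :: xs))
termination_by l => l.length
decreasing_by simp [length_diffsB]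

theorem diffsB_cons (a b : Int) (t : List Int) :
    diffsB (a :: b :: t) = (b - a) :: diffsB (b :: t) := by
  simp [diffsB, PySem.List.slice_from_one]

theorem getD_mid (p q r : List Int) (x : Int) :
    (p ++ (q ++ x :: r)).getD (p.length + q.length) 0 = x := by
  simp [List.getD]

theorem set_mid (p q r : List Int) (x v : Int) :
    (p ++ (q ++ x :: r)).set (p.length + q.length) v = p ++ (q ++ v :: r) := by
  simp

theorem diffsB_append_last (s : List Int) (c : Int) (hs : s ≠ []) :
    diffsB (s ++ [c]) = diffsB s ++ [c - s.getLast hs] := by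
  induction s with
  | nil => exact absurd rfl hs
  | cons a s' ih =>
    cases s' with
    | nil => simp [diffsB, PySem.List.slice_from_one]
    | cons b t =>
      simp only [List.cons_append] at ih ⊢
      rw [diffsB_cons, diffsB_cons, ih (by simp)]
      simp

theorem innerLemma (m : ℕ) : ∀ (s p r : List Int) (hs : s ≠ []), s.length = m + 1 →
    (PySem.List.pyRange ((p.length : Int) + s.length - 1) (p.length : Int) (-1)).foldl
      innerStep (p ++ s ++ r)
    = p ++ (s.head hs :: diffsB s) ++ r := by
  induction m with
  | zero =>
    intro s p r hs hlen
    match s, hs, hlen with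
    | [a], _, _ =>
      rw [show ((p.length : Int) + ([a] : List Int).length - 1) = (p.length : Int) by simp,
        PySem.List.pyRange_neg_one_eq_nil le_rfl]
      simp [diffsB, PySem.List.slice_from_one]
  | succ m ih =>
    intro s p r hs hlen
    obtain ⟨s₁, c, rfl⟩ : ∃ s₁ c, s = s₁ ++ [c] :=
      ⟨s.dropLast, s.getLast hs, (List.dropLast_concat_getLast hs).symm⟩
    have hs1len : s₁.length = m + 1 := by simp at hlen; omega
    have hs1 : s₁ ≠ [] := by intro h; rw [h] at hs1len; simp at hs1len
    obtain ⟨u, b, rfl⟩ : ∃ u b, s₁ = u ++ [b] :=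
      ⟨s₁.dropLast, s₁.getLast hs1, (List.dropLast_concat_getLast hs1).symm⟩
    have htop : ((p.length : Int) + ((u ++ [b]) ++ [c] : List Int).length - 1)
        = ((p.length + (u ++ [b]).length : ℕ) : ℤ) := by simp; omega
    rw [PySem.List.pyRange_neg_one_cons (by simp; omega), List.foldl_cons]
    have hstate : innerStep (p ++ ((u ++ [b]) ++ [c]) ++ r)
        ((p.length : Int) + ((u ++ [b]) ++ [c] : List Int).length - 1)
        = p ++ (u ++ [b]) ++ ((c - b) :: r) := by
      rw [htop]
      unfold innerStep
      rw [PySem.List.pySetD_natCast, PySem.List.pyGetD_natCast,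
        show ((p.length + (u ++ [b]).length : ℕ) : ℤ) - 1 = ((p.length + u.length : ℕ) : ℤ) by
          simp; omega,
        PySem.List.pyGetD_natCast]
      rw [show p ++ ((u ++ [b]) ++ [c]) ++ r = p ++ ((u ++ [b]) ++ c :: r) by simp]
      rw [getD_mid]
      rw [show p ++ ((u ++ [b]) ++ c :: r) = p ++ (u ++ b :: (c :: r)) by simp]
      rw [getD_mid, show p ++ (u ++ b :: c :: r) = p ++ ((u ++ [b]) ++ c :: r) by simp,
        set_mid]
      simp
    rw [hstate,
      show ((p.length : Int) + ((u ++ [b]) ++ [c] : List Int).length - 1 - 1)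
        = ((p.length : Int) + ((u ++ [b]) : List Int).length - 1) by simp; omega,
      ih (u ++ [b]) p ((c - b) :: r) (by simp) (by simpa using hs1len)]
    rw [diffsB_append_last ((u ++ [b])) c (by simp)]
    simp
    rcases u with _ | ⟨a, u'⟩ <;> simp

theorem outerLemma (m : ℕ) : ∀ (t p : List Int) (n : Int), t ≠ [] → t.length = m + 1 →
    n = (p.length : Int) + t.length →
    (PySem.List.pyRange (p.length : Int) (n - 1) 1).foldl (fun s i => innerFold n i s) (p ++ t)
    = p ++ Drec t := by
  induction m with
  | zero =>
    intro t p n ht hlen hn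
    match t, ht, hlen, hn with
    | [a], _, _, hn =>
      rw [PySem.List.pyRange_one_eq_nil (by simp at hn; omega)]
      simp [Drec, diffsB, PySem.List.slice_from_one]
  | succ m ih =>
    intro t p n ht hlen hn
    match t, hlen, hn with
    | x :: xs, hlen, hn =>
      rw [PySem.List.pyRange_one_cons (by simp at hlen hn ⊢; omega), List.foldl_cons]
      have hfirst : innerFold n (p.length : Int) (p ++ (x :: xs))
          = (p ++ [x]) ++ diffsB (x :: xs) := by
        unfold innerFold
        rw [show n - 1 = (p.length : Int) + ((x :: xs : List Int).length : Int) - 1 by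
          rw [hn]]
        have h := innerLemma (m + 1) (x :: xs) p [] (by simp) (by simpa using hlen)
        simp only [List.append_nil] at h
        rw [h]
        simp
      rw [hfirst]
      have hrec := ih (diffsB (x :: xs)) (p ++ [x]) n
        (by
          have := length_diffsB (x :: xs)
          intro hnil
          rw [hnil] at this
          simp at this hlen
          omega)
        (by
          have := length_diffsB (x :: xs)
          simp at this hlen ⊢
          omega)
        (by
          have := length_diffsB (x :: xs)
          simp at this hlen ⊢
          omega)
      rw [show ((p.length : Int) + 1) = (((p ++ [x] : List Int).length : Nat) : Int) by simp] 
      rw [hrec]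
      rw [show Drec (x :: xs) = x :: Drec (diffsB (x :: xs)) from by rw [Drec]]
      simp

theorem whileB_foldr (m : ℕ) : ∀ (l : List Int), l.length = m → ∀ (e s : Int),
    whileB l e s = e + s * List.foldr (fun x a => x - a) 0 (Drec l) := by
  induction m with
  | zero =>
    intro l hlen e s
    match l, hlen with
    | [], _ => rw [whileB, Drec]; simp
  | succ m ih =>
    intro l hlen e s
    match l, hlen with
    | x :: xs, hlen =>
      rw [whileB, ih (diffsB (x :: xs)) (by have := length_diffsB (x :: xs); simp at this hlen ⊢; omega)]
      rw [show Drec (x :: xs) = x :: Drec (diffsB (x :: xs)) from by rw [Drec]]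
      simp
      ring

theorem per_seq (seq : List Int) :
    (outerFold (seq.length : Int) seq).reverse.foldl (fun extrap x => x - extrap) 0
    = whileB seq 0 1 := by
  match seq with
  | [] =>
    rw [whileB]
    unfold outerFold
    rw [PySem.List.pyRange_one_eq_nil (by norm_num)]
    simp
  | x :: xs =>
    have h := outerLemma xs.length (x :: xs) [] ((x :: xs : List Int).length : Int)
      (by simp) (by simp) (by simp)
    unfold outerFold
    simp only [List.nil_append, List.length_nil, Nat.cast_zero] at h
    rw [h, List.foldl_reverse,
      whileB_foldr (x :: xs).length (x :: xs) rfl 0 1]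
    simp

-- ===== VERDICT (by name: the statement is the Claim_ definition above) =====
theorem left_sum_spec : Claim_equal_left_sum := by
  intro seqs _
  unfold Spec_left_sum left_sum left_sum_alt
  congr 1
  funext gs seq
  show gs + _ = gs + whileB seq 0 1
  rw [per_seq]
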